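-- pv_equiv track=rewrite | github.com/abulyomon/fdcalc | mincover.py | check_redundant
-- ===== SOURCE A (Python) =====
-- def check_redundant(lhs, rhs, max_cover):
-- 	#print "DEBUG: In check_redundant(" + lhs + ',' + rhs + ')'
-- 	for right in max_cover[lhs]:
-- 		#print "DEBUG: checking lhs " + lhs + " and right " + right
-- 		if right in max_cover.keys():
-- 			if rhs in max_cover[right]:
-- 				return True
-- 			else:
-- 				return check_redundant(right, rhs, max_cover)
-- 		else:
-- 			pass
-- 			#print "DEBUG: no keys"
-- 	return False
-- ===== SOURCE B (Python) =====
-- def check_redundant(lhs, rhs, max_cover):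
--     while True:
--         right = next((r for r in max_cover[lhs] if r in max_cover), None)
--         if right is None:
--             return False
--         if rhs in max_cover[right]:
--             return True
--         lhs = right
-- ===== Notes on version B (the rewrite author's own statement) =====
-- stated objective: simpler
-- what changed: The tail recursion is eliminated into a while-loop whose each iteration finds the first key-neighbor with a single next(...) search instead of an explicit scan with nested early returns.
import Mathlib
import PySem

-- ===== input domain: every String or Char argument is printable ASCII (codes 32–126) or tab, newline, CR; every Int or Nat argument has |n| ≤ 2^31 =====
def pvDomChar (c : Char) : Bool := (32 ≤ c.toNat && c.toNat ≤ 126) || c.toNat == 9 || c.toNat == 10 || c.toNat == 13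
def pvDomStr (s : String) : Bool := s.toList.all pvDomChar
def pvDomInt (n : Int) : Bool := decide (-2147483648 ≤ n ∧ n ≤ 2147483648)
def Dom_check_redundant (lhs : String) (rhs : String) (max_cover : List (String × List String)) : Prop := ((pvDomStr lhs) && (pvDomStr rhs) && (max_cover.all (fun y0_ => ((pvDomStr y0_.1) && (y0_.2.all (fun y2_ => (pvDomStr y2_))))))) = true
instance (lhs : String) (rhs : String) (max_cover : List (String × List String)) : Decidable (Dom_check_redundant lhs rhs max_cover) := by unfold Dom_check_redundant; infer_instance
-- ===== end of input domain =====

-- B replaces A's recursion by a while-loop that finds the first key-neighbor with a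
-- single search per step (simpler decomposition, same cost).

-- shared dict primitives: `r in max_cover.keys()` and `max_cover[k]` (Python raises
-- KeyError when k is not a key; Pre_ excludes that, the port defaults to [])
def pvIsKey (mc : List (String × List String)) (r : String) : Bool :=
  ((PySem.Dict.ofList mc).get? r).isSome

def pvCover (mc : List (String × List String)) (k : String) : List String :=
  ((PySem.Dict.ofList mc).get? k).getD []

-- ===== PORT A =====
-- A's `for right in max_cover[lhs]` loop with its early returns; `recurse` is the
-- recursive call `check_redundant(right, rhs, max_cover)` at one less fuel
def goLoopA (mc : List (String × List String)) (rhs : String)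
    (recurse : String → Bool) : List String → Bool
  | [] => false
  | r :: rest =>
    if pvIsKey mc r then
      if rhs ∈ pvCover mc r then true else recurse r
    else goLoopA mc rhs recurse rest

-- fuel only makes Python's unbounded recursion total: Pre_ (below) admits exactly
-- the inputs on which the Python terminates, and there the first-key chain decides
-- within at most max_cover.length + 1 steps, so the fuel is never exhausted
def goA (mc : List (String × List String)) (rhs : String) : Nat → String → Bool
  | 0, _ => false
  | f + 1, lhs => goLoopA mc rhs (goA mc rhs f) (pvCover mc lhs)

def check_redundant (lhs : String) (rhs : String) (max_cover : List (String × List String)) : Bool :=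
  goA max_cover rhs (max_cover.length + 1) lhs

-- ===== PORT B =====
-- the `while True` loop: find the first key-neighbor, decide, else advance lhs
def goB (mc : List (String × List String)) (rhs : String) : Nat → String → Bool
  | 0, _ => false
  | f + 1, lhs =>
    match (pvCover mc lhs).find? (fun r => pvIsKey mc r) with
    | none => false
    | some r => if rhs ∈ pvCover mc r then true else goB mc rhs f r

def check_redundant_alt (lhs : String) (rhs : String) (max_cover : List (String × List String)) : Bool :=
  goB max_cover rhs (max_cover.length + 1) lhs

-- ===== PRECONDITION & SPEC =====
-- first-key successor in the dependency graph (used only by Pre_, not by the ports)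
def pvStepPre (mc : List (String × List String)) (x : String) : Option String :=
  (((PySem.Dict.ofList mc).get? x).getD []).find?
    (fun r => ((PySem.Dict.ofList mc).get? r).isSome)

-- does the chain node o escape at this step, i.e. its first key-neighbor covers rhs?
def pvEscapeAt (mc : List (String × List String)) (rhs : String) (o : Option String) : Bool :=
  match o with
  | none => false
  | some x =>
    match pvStepPre mc x with
    | none => false
    | some r => (((PySem.Dict.ofList mc).get? r).getD []).contains rhs

-- Pre_ excludes exactly the inputs on which the Python A raises: KeyError when lhs
-- is not a key, and RecursionError when the deterministic first-key successor chain
-- from lhs is infinite (cyclic) without ever reaching a node whose first key-neighbor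
-- covers rhs; wherever A returns a value, Pre_ holds (the chain either dies out or
-- escapes within max_cover.length + 1 steps, before any node can repeat).
def Pre_check_redundant (lhs : String) (rhs : String) (max_cover : List (String × List String)) : Prop :=
  lhs ∈ (PySem.Dict.ofList max_cover).keys ∧
  ((fun o : Option String => o.bind (pvStepPre max_cover))^[max_cover.length + 1] (some lhs) = none
    ∨ (List.range (max_cover.length + 1)).any
        (fun k => pvEscapeAt max_cover rhs
          ((fun o : Option String => o.bind (pvStepPre max_cover))^[k] (some lhs))) = true)
instance (lhs : String) (rhs : String) (max_cover : List (String × List String)) : Decidable (Pre_check_redundant lhs rhs max_cover) := by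
  unfold Pre_check_redundant; infer_instance

def pvWitness_check_redundant : String × String × (List (String × List String)) :=
  ("a", "x", [("a", ["b"]), ("b", [])])

def Spec_check_redundant (lhs : String) (rhs : String) (max_cover : List (String × List String)) (out : Bool) : Prop := out = check_redundant_alt lhs rhs max_cover
instance (lhs : String) (rhs : String) (max_cover : List (String × List String)) (out : Bool) : Decidable (Spec_check_redundant lhs rhs max_cover out) := by unfold Spec_check_redundant; infer_instance

-- ===== CLAIM (what is proved, stated in full; the proofs are below) =====
def Claim_equal_check_redundant : Prop := ∀ (lhs : String) (rhs : String) (max_cover : List (String × List String)), Dom_check_redundant lhs rhs max_cover → Pre_check_redundant lhs rhs max_cover → Spec_check_redundant lhs rhs max_cover (check_redundant lhs rhs max_cover)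

-- ===== LEMMAS AND PROOFS =====

-- A's scan over one cover list equals "first key-neighbor decides"
theorem goLoopA_eq_find (mc : List (String × List String)) (rhs : String)
    (recurse : String → Bool) (vs : List String) :
    goLoopA mc rhs recurse vs =
      match vs.find? (fun r => pvIsKey mc r) with
      | none => false
      | some r => if rhs ∈ pvCover mc r then true else recurse r := by
  induction vs with
  | nil => simp [goLoopA, List.find?]
  | cons r rest ih =>
    by_cases h : pvIsKey mc r
    · simp [goLoopA, List.find?, h]
    · simp [goLoopA, List.find?, h, ih]

theorem goA_eq_goB (mc : List (String × List String)) (rhs : String) :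
    ∀ (f : Nat) (lhs : String), goA mc rhs f lhs = goB mc rhs f lhs := by
  intro f
  induction f with
  | zero => intro lhs; rfl
  | succ f ih =>
    intro lhs
    rw [goA, goB, goLoopA_eq_find]
    cases (pvCover mc lhs).find? (fun r => pvIsKey mc r) with
    | none => rfl
    | some r =>
      by_cases h : rhs ∈ pvCover mc r
      · simp [h]
      · simp [h, ih r]

-- ===== VERDICT (by name: the statement is the Claim_ definition above) =====
theorem check_redundant_spec : Claim_equal_check_redundant := by
  intro lhs rhs mc _ _
  unfold Spec_check_redundant check_redundant check_redundant_alt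
  exact goA_eq_goB mc rhs (mc.length + 1) lhs
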